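-- pv_equiv track=rewrite | github.com/piriyaponk/alphaabsolute | scripts/learning/td_sequential.py | calc_td_setup
-- ===== SOURCE A (Python) =====
-- def calc_td_setup(closes: list) -> list:
--     """
--     TD Setup Phase — counts consecutive bars of price exhaustion.
--
--     Sell Setup: close > close[4 bars ago] -- counts +1 to +9
--     Buy Setup:  close < close[4 bars ago] -- counts -1 to -9
--     Count resets on any interruption (one bar in opposite direction).
--
--     Returns list of int same length as closes.
--     +9 = sell setup COMPLETE (upside exhaustion, potential top)
--     -9 = buy setup COMPLETE (downside exhaustion, potential bottom)
--     """
--     n = len(closes)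
--     counts = [0] * n
--     sell_count = 0
--     buy_count = 0
--
--     for i in range(4, n):
--         c  = closes[i]
--         c4 = closes[i - 4]
--
--         if c > c4:
--             sell_count += 1
--             buy_count = 0
--             counts[i] = min(sell_count, 9)
--         elif c < c4:
--             buy_count += 1
--             sell_count = 0
--             counts[i] = -min(buy_count, 9)
--         else:
--             # Equal close — reset both
--             sell_count = 0
--             buy_count = 0
--             counts[i] = 0
--
--     return counts
-- ===== SOURCE B (Python) =====
-- def calc_td_setup(closes: list) -> list:
--     """Run-based TD Setup: build a +1/-1/0 direction list vs close[4 bars ago],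
--     then walk runs of equal direction emitting capped 1-based positions."""
--     n = len(closes)
--     d = [(1 if closes[i] > closes[i - 4] else -1 if closes[i] < closes[i - 4] else 0)
--          for i in range(4, n)]
--     out = [0] * min(4, n)
--     m = len(d)
--     j = 0
--     while j < m:
--         v = d[j]
--         k = j + 1
--         while k < m and d[k] == v:
--             k += 1
--         if v == 0:
--             out += [0] * (k - j)
--         else:
--             out += [v * min(p, 9) for p in range(1, k - j + 1)]
--         j = k
--     return out
-- ===== Notes on version B (the rewrite author's own statement) =====
-- stated objective: alternative
-- what changed: Replaces the single stateful pass that indexes into a preallocated counts array with two sell/buy counters by a direction list (+1/0/-1 vs close[4 bars ago]) followed by a run scanner that emits capped 1-based positions per run of equal direction.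
import Mathlib
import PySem

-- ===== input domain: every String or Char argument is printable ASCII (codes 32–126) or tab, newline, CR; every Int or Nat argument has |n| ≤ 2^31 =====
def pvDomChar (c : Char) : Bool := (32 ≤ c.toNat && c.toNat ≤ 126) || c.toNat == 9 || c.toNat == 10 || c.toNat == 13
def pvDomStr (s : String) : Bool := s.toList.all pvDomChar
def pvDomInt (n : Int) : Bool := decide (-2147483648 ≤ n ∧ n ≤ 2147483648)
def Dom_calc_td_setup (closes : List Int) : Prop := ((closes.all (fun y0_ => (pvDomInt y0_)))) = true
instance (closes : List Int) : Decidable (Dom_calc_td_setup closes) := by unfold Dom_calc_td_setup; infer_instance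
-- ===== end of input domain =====

-- B replaces A's single stateful pass (preallocated counts array + sell/buy counters)
-- by a direction list plus a run scanner emitting capped 1-based run positions (objective: alternative, same O(n) cost).


-- ===== PORT A =====
-- counts[i] = v becomes List.set; the loop indices satisfy 4 ≤ i < len, so the
-- (pyGet? …).getD 0 reads and i.toNat are exact (never out of range / negative).
def calc_td_setup (closes : List Int) : List Int :=
  ((PySem.List.pyRange 4 closes.length 1).foldl
    (fun (st : List Int × Int × Int) i =>
      let c  := (PySem.List.pyGet? closes i).getD 0
      let c4 := (PySem.List.pyGet? closes (i - 4)).getD 0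
      if c > c4 then (st.1.set i.toNat (min (st.2.1 + 1) 9), st.2.1 + 1, 0)
      else if c < c4 then (st.1.set i.toNat (-(min (st.2.2 + 1) 9)), 0, st.2.2 + 1)
      else (st.1.set i.toNat 0, 0, 0))
    (List.replicate closes.length 0, 0, 0)).1

-- ===== PORT B =====
-- Source B's direction list d: +1 / -1 / 0 comparing closes[i] with closes[i-4] (indices always in range)
def pvDir (closes : List Int) : List Int :=
  (PySem.List.pyRange 4 closes.length 1).map (fun i =>
    if (PySem.List.pyGet? closes i).getD 0 > (PySem.List.pyGet? closes (i - 4)).getD 0 then 1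
    else if (PySem.List.pyGet? closes i).getD 0 < (PySem.List.pyGet? closes (i - 4)).getD 0 then -1
    else 0)

-- Source B's run scanner: the outer while walks j over d; here the suffix d[j:] is the
-- recursion argument, the inner while (maximal run of d[j]) is takeWhile and the
-- remainder d[k:] is dropWhile
def pvRuns : List Int → List Int
  | [] => []
  | v :: t =>
    (if v = 0 then List.replicate ((t.takeWhile (· == v)).length + 1) (0 : Int)
     else (PySem.List.pyRange 1 (((t.takeWhile (· == v)).length + 1 : Nat) + 1) 1).map
            (fun p => v * min p 9))
    ++ pvRuns (t.dropWhile (· == v))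
termination_by d => d.length
decreasing_by
  have := List.length_dropWhile_le (· == v) t
  simp; omega

def calc_td_setup_alt (closes : List Int) : List Int :=
  List.replicate (min 4 closes.length) 0 ++ pvRuns (pvDir closes)

-- ===== PRECONDITION & SPEC =====
def Spec_calc_td_setup (closes : List Int) (out : List Int) : Prop := out = calc_td_setup_alt closes
instance (closes : List Int) (out : List Int) : Decidable (Spec_calc_td_setup closes out) := by unfold Spec_calc_td_setup; infer_instance

-- ===== CLAIM (what is proved, stated in full; the proofs are below) =====
def Claim_equal_calc_td_setup : Prop := ∀ (closes : List Int), Dom_calc_td_setup closes → Spec_calc_td_setup closes (calc_td_setup closes)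

-- ===== LEMMAS AND PROOFS =====

-- reference recursion: process the direction list with A's (sell, buy) counter state
def pvG : List Int → Int → Int → List Int
  | [], _, _ => []
  | v :: t, s, b =>
    if v = 1 then min (s + 1) 9 :: pvG t (s + 1) 0
    else if v = -1 then -(min (b + 1) 9) :: pvG t 0 (b + 1)
    else 0 :: pvG t 0 0
lemma pvG_head_ne_one (d : List Int) (s s' b : Int) (h : d.head? ≠ some 1) :
    pvG d s b = pvG d s' b := by
  cases d with
  | nil => rfl
  | cons v t =>
    simp at h
    simp [pvG, h]
lemma pvG_head_ne_negone (d : List Int) (s b b' : Int) (h : d.head? ≠ some (-1)) :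
    pvG d s b = pvG d s b' := by
  cases d with
  | nil => rfl
  | cons v t =>
    simp at h
    by_cases h1 : v = 1 <;> simp [pvG, h1, h]
lemma pvG_run_pos (r : Nat) (t : List Int) (s : Int) :
    pvG (List.replicate r 1 ++ t) s 0
      = (List.range r).map (fun k : Nat => min (s + (k : Int) + 1) 9) ++ pvG t (s + r) 0 := by
  induction r generalizing s with
  | zero => simp
  | succ r ih =>
    rw [List.replicate_succ]
    simp only [List.cons_append, pvG, if_pos]
    rw [ih (s + 1), List.range_succ_eq_map]
    simp only [List.map_cons, List.map_map, List.cons_append]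
    refine List.cons_eq_cons.mpr ⟨by omega, ?_⟩
    refine congrArg₂ _ ?_ (by congr 1; omega)
    apply List.map_congr_left
    intro k _
    simp [Function.comp]
    omega
lemma pvG_run_neg (r : Nat) (t : List Int) (b : Int) :
    pvG (List.replicate r (-1) ++ t) 0 b
      = (List.range r).map (fun k : Nat => -(min (b + (k : Int) + 1) 9)) ++ pvG t 0 (b + r) := by
  induction r generalizing b with
  | zero => simp
  | succ r ih =>
    rw [List.replicate_succ]
    simp only [List.cons_append, pvG]
    norm_num
    rw [ih (b + 1), List.range_succ_eq_map]
    simp only [List.map_cons, List.map_map, List.cons_append]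
    refine List.cons_eq_cons.mpr ⟨by omega, ?_⟩
    refine congrArg₂ _ ?_ (by congr 1; omega)
    apply List.map_congr_left
    intro k _
    simp [Function.comp]
    omega
lemma pvG_run_zero (r : Nat) (t : List Int) :
    pvG (List.replicate r 0 ++ t) 0 0 = List.replicate r 0 ++ pvG t 0 0 := by
  induction r with
  | zero => simp
  | succ r ih =>
    rw [List.replicate_succ]
    simpa [pvG] using ih
lemma pvTakeWhile_replicate (t : List Int) (v : Int) :
    t.takeWhile (· == v) = List.replicate (t.takeWhile (· == v)).length v := by
  apply List.eq_replicate_of_mem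
  intro x hx
  simpa using (List.mem_takeWhile_imp hx)
lemma pvDropWhile_head (t : List Int) (v : Int) (a : Int)
    (h : (t.dropWhile (· == v)).head? = some a) : a ≠ v := by
  have := List.head?_dropWhile_not (· == v) t
  simp [h] at this
  simpa using this
lemma pvRange_one_nat (r : Nat) :
    PySem.List.pyRange 1 ((r : Int) + 1) 1 = (List.range r).map (fun k : Nat => (k : Int) + 1) := by
  induction r with
  | zero => simp [PySem.List.pyRange_one_eq_nil]
  | succ r ih =>
    have h : (1 : Int) ≤ (r : Int) + 1 := by omega
    have h2 := PySem.List.pyRange_one_succ_right (a := 1) (b := (r : Int) + 1) h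
    push_cast
    rw [show (r : Int) + 1 + 1 = ((r : Int) + 1) + 1 by ring, h2, ih, List.range_succ]
    simp
lemma pvRuns_eq_pvG (d : List Int) (hmem : ∀ x ∈ d, x = 1 ∨ x = -1 ∨ x = 0) :
    pvRuns d = pvG d 0 0 := by
  induction hlen : d.length using Nat.strong_induction_on generalizing d with
  | _ n ih =>
  cases d with
  | nil => simp [pvRuns, pvG]
  | cons v t =>
    have hrest : (t.dropWhile (· == v)).length < n := by
      have := List.length_dropWhile_le (· == v) t
      simp at hlen; omega
    have hmem' : ∀ x ∈ t.dropWhile (· == v), x = 1 ∨ x = -1 ∨ x = 0 := by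
      intro x hx
      exact hmem x (by right; exact (List.dropWhile_sublist _).mem hx)
    have hIH := ih _ hrest _ hmem' rfl
    have hdecomp : v :: t = List.replicate ((t.takeWhile (· == v)).length + 1) v
        ++ t.dropWhile (· == v) := by
      conv_lhs => rw [← List.takeWhile_append_dropWhile (p := (· == v)) (l := t)]
      rw [List.replicate_succ]
      simp [← pvTakeWhile_replicate]
    rcases hmem v (List.mem_cons_self) with hv | hv | hv
    all_goals subst hv
    · -- run of +1
      have hne : (t.dropWhile (· == (1:Int))).head? ≠ some 1 := by
        intro hh; exact (pvDropWhile_head t 1 1 hh) rfl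
      rw [pvRuns]
      norm_num
      rw [show ((((t.takeWhile (· == (1:Int))).length : Int)) + 1 + 1)
            = ((((t.takeWhile (· == (1:Int))).length + 1 : Nat) : Int) + 1) by push_cast; ring,
          pvRange_one_nat, hIH]
      conv_rhs => rw [hdecomp]
      rw [pvG_run_pos, List.map_map]
      refine congrArg₂ _ ?_ ?_
      · apply List.map_congr_left
        intro k _
        simp [Function.comp]
      · exact pvG_head_ne_one _ _ _ _ hne
    · -- run of -1
      have hne : (t.dropWhile (· == (-1:Int))).head? ≠ some (-1) := by
        intro hh; exact (pvDropWhile_head t (-1) (-1) hh) rfl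
      rw [pvRuns]
      norm_num
      rw [show ((((t.takeWhile (· == (-1:Int))).length : Int)) + 1 + 1)
            = ((((t.takeWhile (· == (-1:Int))).length + 1 : Nat) : Int) + 1) by push_cast; ring,
          pvRange_one_nat, hIH]
      conv_rhs => rw [hdecomp]
      rw [pvG_run_neg, List.map_map]
      refine congrArg₂ _ ?_ ?_
      · apply List.map_congr_left
        intro k _
        simp [Function.comp]
      · exact pvG_head_ne_negone _ _ _ _ hne
    · -- run of 0
      rw [pvRuns]
      norm_num
      conv_rhs => rw [hdecomp]
      rw [pvG_run_zero, hIH]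
lemma pvTakeSet (l : List Int) (m : Nat) (v : Int) (h : m < l.length) :
    (l.set m v).take (m+1) = l.take m ++ [v] := by
  rw [List.take_add_one]
  simp [List.take_set, h, List.set_eq_of_length_le]

lemma pvFoldA (closes : List Int) :
    ∀ k m (counts : List Int) (s b : Int), counts.length = closes.length →
      m + k = closes.length →
      ((PySem.List.pyRange (m : Int) closes.length 1).foldl
        (fun (st : List Int × Int × Int) i =>
          let c  := (PySem.List.pyGet? closes i).getD 0
          let c4 := (PySem.List.pyGet? closes (i - 4)).getD 0
          if c > c4 then (st.1.set i.toNat (min (st.2.1 + 1) 9), st.2.1 + 1, 0)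
          else if c < c4 then (st.1.set i.toNat (-(min (st.2.2 + 1) 9)), 0, st.2.2 + 1)
          else (st.1.set i.toNat 0, 0, 0))
        (counts, s, b)).1
      = counts.take m
        ++ pvG ((PySem.List.pyRange (m : Int) closes.length 1).map (fun i =>
            if (PySem.List.pyGet? closes i).getD 0 > (PySem.List.pyGet? closes (i - 4)).getD 0 then 1
            else if (PySem.List.pyGet? closes i).getD 0 < (PySem.List.pyGet? closes (i - 4)).getD 0 then -1
            else 0)) s b := by
  intro k
  induction k with
  | zero =>
    intro m counts s b hlen hmk
    have : (m : Int) = (closes.length : Int) := by omega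
    rw [this, PySem.List.pyRange_one_eq_nil le_rfl]
    simp only [List.foldl_nil, List.map_nil]
    rw [show m = counts.length by omega]
    simp [pvG]
  | succ k ih =>
    intro m counts s b hlen hmk
    have hmn : (m : Int) < (closes.length : Int) := by omega
    have hmlt : m < counts.length := by omega
    rw [PySem.List.pyRange_one_cons hmn,
        show ((m : Int) + 1) = ((m + 1 : Nat) : Int) by push_cast; ring]
    simp only [List.foldl_cons, List.map_cons, Int.toNat_natCast]
    split_ifs with h1 h2
    · rw [ih (m+1) _ _ _ (by simpa using hlen) (by omega),
          pvTakeSet _ _ _ hmlt, List.append_assoc]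
      simp [pvG]
    · rw [ih (m+1) _ _ _ (by simpa using hlen) (by omega),
          pvTakeSet _ _ _ hmlt, List.append_assoc]
      norm_num [pvG]
    · rw [ih (m+1) _ _ _ (by simpa using hlen) (by omega),
          pvTakeSet _ _ _ hmlt, List.append_assoc]
      norm_num [pvG]

lemma pvDir_mem (closes : List Int) : ∀ x ∈ pvDir closes, x = 1 ∨ x = -1 ∨ x = 0 := by
  intro x hx
  rcases List.mem_map.mp hx with ⟨i, _, rfl⟩
  split_ifs <;> simp

-- ===== VERDICT (by name: the statement is the Claim_ definition above) =====
theorem calc_td_setup_spec : Claim_equal_calc_td_setup := by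
  intro closes _
  unfold Spec_calc_td_setup calc_td_setup calc_td_setup_alt
  rw [pvRuns_eq_pvG _ (pvDir_mem closes)]
  by_cases h4 : 4 ≤ closes.length
  · conv_lhs => rw [show PySem.List.pyRange 4 (closes.length : Int) 1
        = PySem.List.pyRange (((4 : Nat) : Int)) (closes.length : Int) 1 by norm_num]
    rw [pvFoldA closes (closes.length - 4) 4 _ 0 0 (by simp) (by omega)]
    rw [List.take_replicate, pvDir]
    norm_num
  · have hnil : PySem.List.pyRange 4 (closes.length : Int) 1 = [] :=
      PySem.List.pyRange_one_eq_nil (by omega)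
    rw [pvDir, hnil, show min 4 closes.length = closes.length by omega]
    simp [pvG]
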